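-- pv_equiv track=rewrite | github.com/id523a/Computer12 | Assembler12/Assembler12/__main__.py | mif_lines
-- ===== SOURCE A (Python) =====
-- from itertools import chain as iter_chain
--
-- def mif_lines(mem):
--     # Write file header
--     yield '-- Assembler12 - generated file'
--     yield 'WIDTH=12;'
--     yield f'DEPTH={len(mem)};'
--     yield 'ADDRESS_RADIX=HEX;'
--     yield 'DATA_RADIX=HEX;'
--     yield ''
--     yield 'CONTENT BEGIN'
--     # Run-length encode file contents
--     prev_word = -1
--     run_start = 0
--     address = 0
--     addr_width = (len(mem).bit_length() + 3) // 4
--     # The 'mem' array is extended with a value that cannot be in the input,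
--     # so that the last run is finished properly
--     for word in iter_chain(mem, (None,)):
--         # Negative values in the input should be written as zeros
--         if word is not None and word < 0:
--             word = 0
--         # If a new run has started,
--         if word != prev_word:
--             run_length = address - run_start
--             # write out the previous run
--             if run_length >= 1:
--                 run_end = address - 1
--                 if run_length == 1:
--                     addr_part = f'\t{run_start:0{addr_width}X}'
--                 else:
--                     addr_part = f'\t[{run_start:0{addr_width}X}..{run_end:0{addr_width}X}]'
--                 yield f'{addr_part} : {prev_word:03X};'
--             # Start the new run
--             run_start = address
--             prev_word = word
--         address += 1
--     yield 'END;'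
-- ===== SOURCE B (Python) =====
-- def mif_lines(mem):
--     yield '-- Assembler12 - generated file'
--     yield 'WIDTH=12;'
--     yield f'DEPTH={len(mem)};'
--     yield 'ADDRESS_RADIX=HEX;'
--     yield 'DATA_RADIX=HEX;'
--     yield ''
--     yield 'CONTENT BEGIN'
--     n = len(mem)
--     addr_width = (n.bit_length() + 3) // 4
--     # staged passes: clamp, then find run-start indices by comparing adjacent
--     # pairs, then pair consecutive boundaries and emit by random access
--     vals = [w if w > 0 else 0 for w in mem]
--     starts = ([0] + [i + 1 for i, (a, b) in enumerate(zip(vals, vals[1:])) if a != b]) if vals else []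
--     for s, e in zip(starts, starts[1:] + [n]):
--         if e - s == 1:
--             addr_part = f'\t{s:0{addr_width}X}'
--         else:
--             addr_part = f'\t[{s:0{addr_width}X}..{e - 1:0{addr_width}X}]'
--         yield f'{addr_part} : {vals[s]:03X};'
--     yield 'END;'
-- ===== Notes on version B (the rewrite author's own statement) =====
-- stated objective: alternative
-- what changed: Replaced A's one-pass prev-word/None-sentinel run-length state machine by staged passes: clamp into a list, compute run-start boundary indices by comparing adjacent pairs (zip of the list with its tail), then pair each boundary with the next one (or len(mem)) and emit each run line by random-access lookup of the run's first element.
import Mathlib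
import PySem

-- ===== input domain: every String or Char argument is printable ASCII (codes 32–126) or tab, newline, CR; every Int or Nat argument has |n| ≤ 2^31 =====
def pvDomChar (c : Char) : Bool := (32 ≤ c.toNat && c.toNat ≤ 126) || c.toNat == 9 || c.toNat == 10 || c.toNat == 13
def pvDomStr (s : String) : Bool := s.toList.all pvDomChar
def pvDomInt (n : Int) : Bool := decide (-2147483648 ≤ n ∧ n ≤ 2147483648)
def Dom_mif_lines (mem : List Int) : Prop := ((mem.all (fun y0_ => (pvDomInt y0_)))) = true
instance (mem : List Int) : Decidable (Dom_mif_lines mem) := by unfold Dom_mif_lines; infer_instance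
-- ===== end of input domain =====

-- B replaces A's prev-word/None-sentinel run-length state machine by staged
-- passes: clamp, find run-start boundaries by adjacent-pair comparison, pair
-- consecutive boundaries and emit by random access; objective: alternative, same cost.


-- ===== PORT A =====
-- shared formatting helpers (the f-string machinery used identically by both Pythons)
-- f'{n:0{w}X}' for a nonnegative integer n: uppercase hex, zero-padded to width w (exact there)
def hexPad (w : Nat) (n : Nat) : String :=
  let ds := (Nat.toDigits 16 n).map Char.toUpper
  String.ofList (List.replicate (w - ds.length) '0' ++ ds)

-- n.bit_length() for a Nat (exact: 0 for 0, otherwise floor(log2 n)+1)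
def bitLength (n : Nat) : Nat := if n = 0 then 0 else Nat.log2 n + 1

-- the shared header lines and trailing 'END;'
def mifHeader (mem : List Int) : List String :=
  ["-- Assembler12 - generated file", "WIDTH=12;",
   "DEPTH=" ++ PySem.Int.toStr (mem.length : Int) ++ ";",
   "ADDRESS_RADIX=HEX;", "DATA_RADIX=HEX;", "", "CONTENT BEGIN"]

-- A's loop body: state = (prev_word : Option Int (None after the sentinel), run_start, address, output).
-- prev_word is only formatted when a run exists, where it is some nonnegative value; the
-- unreachable none case formats 0 (Python would raise there, but it is never reached).
def aStep (aw : Nat) (st : Option Int × Nat × Nat × List String) (w : Option Int) :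
    Option Int × Nat × Nat × List String :=
  let (prev, run_start, address, out) := st
  let word : Option Int := w.map (fun v => if v < 0 then 0 else v)
  if word ≠ prev then
    let run_length := address - run_start
    let out :=
      if run_length ≥ 1 then
        let run_end := address - 1
        let addr_part :=
          if run_length == 1 then "\t" ++ hexPad aw run_start
          else "\t[" ++ hexPad aw run_start ++ ".." ++ hexPad aw run_end ++ "]"
        out ++ [addr_part ++ " : " ++ hexPad 3 (match prev with | some p => p.toNat | none => 0) ++ ";"]
      else out
    (word, address, address + 1, out)
  else
    (prev, run_start, address + 1, out)

def mif_lines (mem : List Int) : List String :=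
  mifHeader mem ++
    ((mem.map some ++ [none]).foldl (aStep ((bitLength mem.length + 3) / 4))
      (some (-1), 0, 0, [])).2.2.2 ++ ["END;"]

-- ===== PORT B =====
-- Source B: vals = [w if w > 0 else 0 for w in mem];
-- starts = ([0] + [i+1 for i,(a,b) in enumerate(zip(vals, vals[1:])) if a != b]) if vals else [];
-- one line per (s, e) in zip(starts, starts[1:] + [n]); vals[s] is always in range,
-- so the lookup is ported as getD (Python would raise out of range, never reached).
def mif_lines_alt (mem : List Int) : List String :=
  let n := mem.length
  let aw := (bitLength n + 3) / 4
  let vals : List Int := mem.map (fun w => if w > 0 then w else 0)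
  let starts : List Nat :=
    if vals.isEmpty then []
    else 0 :: ((vals.zip (vals.drop 1)).zipIdx.filterMap
      (fun q => if q.1.1 ≠ q.1.2 then some (q.2 + 1) else none))
  let lines := (starts.zip (starts.drop 1 ++ [n])).map (fun se =>
    (if se.2 - se.1 == 1 then "\t" ++ hexPad aw se.1
     else "\t[" ++ hexPad aw se.1 ++ ".." ++ hexPad aw (se.2 - 1) ++ "]")
    ++ " : " ++ hexPad 3 (vals.getD se.1 0).toNat ++ ";")
  mifHeader mem ++ lines ++ ["END;"]

-- ===== PRECONDITION & SPEC =====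
def Spec_mif_lines (mem : List Int) (out : List String) : Prop := out = mif_lines_alt mem
instance (mem : List Int) (out : List String) : Decidable (Spec_mif_lines mem out) := by unfold Spec_mif_lines; infer_instance

-- ===== CLAIM (what is proved, stated in full; the proofs are below) =====
def Claim_equal_mif_lines : Prop := ∀ (mem : List Int), Dom_mif_lines mem → Spec_mif_lines mem (mif_lines mem)

-- ===== LEMMAS AND PROOFS =====

-- the content line for the run covering addresses rs .. addr-1 with value p
def lineStr (aw rs addr : Nat) (p : Int) : String :=
  (if addr - rs == 1 then "\t" ++ hexPad aw rs
   else "\t[" ++ hexPad aw rs ++ ".." ++ hexPad aw (addr - 1) ++ "]")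
  ++ " : " ++ hexPad 3 p.toNat ++ ";"

-- canonical emission: an open run (rs, p) reaching up to addr-1, remaining input xs
def emitRuns (aw : Nat) : Nat → Int → Nat → List Int → List String
  | rs, p, addr, [] => [lineStr aw rs addr p]
  | rs, p, addr, x :: xs =>
    if x = p then emitRuns aw rs p (addr + 1) xs
    else lineStr aw rs addr p :: emitRuns aw addr x (addr + 1) xs

-- run-start indices of xs (scanned from index i, previous value p)
def bnds : Int → Nat → List Int → List Nat
  | _, _, [] => []
  | p, i, x :: xs => if x = p then bnds p (i + 1) xs else i :: bnds x (i + 1) xs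

-- how aStep acts on an already-nonnegative word / on the sentinel
theorem aStep_some (aw : Nat) (p : Int) (rs addr : Nat) (out : List String) (x : Int)
    (hx : 0 ≤ x) :
    aStep aw (some p, rs, addr, out) (some x) =
      if x = p then (some p, rs, addr + 1, out)
      else (some x, addr, addr + 1,
        if addr - rs ≥ 1 then out ++ [lineStr aw rs addr p] else out) := by
  simp only [aStep, Option.map_some, if_neg (by omega : ¬ x < 0), lineStr]
  by_cases hxp : x = p
  · subst hxp; simp
  · rw [if_pos (by simp [hxp]), if_neg hxp]

theorem aStep_none (aw : Nat) (p : Int) (rs addr : Nat) (out : List String) :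
    aStep aw (some p, rs, addr, out) none =
      (none, addr, addr + 1,
       if addr - rs ≥ 1 then out ++ [lineStr aw rs addr p] else out) := by
  simp only [aStep, Option.map_none, lineStr]
  rw [if_pos (by simp)]

-- A's fold over the clamped values with an open nonempty run produces emitRuns
theorem aFold_emit (aw : Nat) (cl : List Int) : ∀ (p : Int) (rs addr : Nat) (out : List String),
    (∀ x ∈ cl, 0 ≤ x) → 0 ≤ p → rs < addr →
    ((cl.map some ++ [none]).foldl (aStep aw) (some p, rs, addr, out)).2.2.2
      = out ++ emitRuns aw rs p addr cl := by
  induction cl with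
  | nil =>
    intro p rs addr out _ _ hlt
    simp only [List.map_nil, List.nil_append, List.foldl_cons, List.foldl_nil,
      aStep_none, if_pos (by omega : addr - rs ≥ 1), emitRuns]
  | cons x xs ih =>
    intro p rs addr out hnn hp hlt
    have hx : 0 ≤ x := hnn x (by simp)
    have hxs : ∀ y ∈ xs, 0 ≤ y := fun y hy => hnn y (by simp [hy])
    simp only [List.map_cons, List.cons_append, List.foldl_cons, aStep_some aw p rs addr out x hx]
    by_cases hxp : x = p
    · rw [if_pos hxp, ih p rs (addr + 1) out hxs hp (by omega)]
      subst hxp; simp [emitRuns]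
    · rw [if_neg hxp, if_pos (by omega : addr - rs ≥ 1),
        ih x addr (addr + 1) _ hxs hx (by omega)]
      simp [emitRuns, hxp, List.append_assoc]

-- the boundary comprehension equals bnds
theorem zipIdx_bnds (tl : List Int) : ∀ (p : Int) (k : Nat),
    (((p :: tl).zip tl).zipIdx k).filterMap
      (fun q => if q.1.1 ≠ q.1.2 then some (q.2 + 1) else none)
    = bnds p (k + 1) tl := by
  induction tl with
  | nil => intro p k; rfl
  | cons x xs ih =>
    intro p k
    by_cases hpx : p = x
    · subst hpx
      simp only [List.zip_cons_cons, List.zipIdx_cons, List.filterMap_cons,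
        ne_eq, not_true_eq_false, if_false, ih p (k + 1)]
      simp [bnds]
    · have hxp : ¬ x = p := fun h => hpx h.symm
      simp only [List.zip_cons_cons, List.zipIdx_cons, List.filterMap_cons,
        ne_eq, hpx, not_false_eq_true, if_true, ih x (k + 1), bnds, if_neg hxp]

-- B's boundary pairing produces emitRuns
theorem bPairs_emit (vals : List Int) (aw : Nat) (xs : List Int) :
    ∀ (p : Int) (rs i : Nat),
    vals.getD rs 0 = p → vals.drop i = xs → rs < i → i ≤ vals.length →
    (((rs :: bnds p i xs).zip ((bnds p i xs) ++ [vals.length])).map (fun se =>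
      (if se.2 - se.1 == 1 then "\t" ++ hexPad aw se.1
       else "\t[" ++ hexPad aw se.1 ++ ".." ++ hexPad aw (se.2 - 1) ++ "]")
      ++ " : " ++ hexPad 3 (vals.getD se.1 0).toNat ++ ";"))
    = emitRuns aw rs p i xs := by
  induction xs with
  | nil =>
    intro p rs i hrs hdrop hlt hle
    have hi : i = vals.length := by
      have := List.drop_eq_nil_iff.mp hdrop; omega
    subst hi
    simp [bnds, emitRuns, lineStr, ← hrs, List.getD]
  | cons x xs ih =>
    intro p rs i hrs hdrop hlt hle
    have hilt : i < vals.length := by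
      by_contra h
      rw [List.drop_eq_nil_of_le (by omega)] at hdrop; simp at hdrop
    have hgi : vals.getD i 0 = x := by
      have h0 : vals[i + 0]? = some x := by
        rw [← List.getElem?_drop, hdrop]; rfl
      simp only [Nat.add_zero] at h0
      simp [List.getD, h0]
    have hdrop1 : vals.drop (i + 1) = xs := by
      have : (vals.drop i).drop 1 = xs := by rw [hdrop]; simp
      simpa [List.drop_drop, Nat.add_comm] using this
    by_cases hxp : x = p
    · subst hxp
      show (((rs :: bnds x i (x :: xs)).zip ((bnds x i (x :: xs)) ++ [vals.length])).map _) = _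
      rw [show bnds x i (x :: xs) = bnds x (i + 1) xs by simp [bnds]]
      rw [ih x rs (i + 1) hrs hdrop1 (by omega) (by omega)]
      simp [emitRuns]
    · rw [show bnds p i (x :: xs) = i :: bnds x (i + 1) xs by simp [bnds, hxp]]
      simp only [List.cons_append, List.zip_cons_cons, List.map_cons]
      rw [ih x i (i + 1) hgi hdrop1 (by omega) (by omega)]
      rw [show emitRuns aw rs p i (x :: xs)
            = lineStr aw rs i p :: emitRuns aw i x (i + 1) xs by simp [emitRuns, hxp]]
      congr 1
      have hrs' : vals[rs]?.getD 0 = p := hrs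
      simp [lineStr, hrs']

-- A's fold over mem equals A's fold over the clamped list (clamping is idempotent)
theorem fold_clamp (aw : Nat) (mem : List Int) : ∀ (st : Option Int × Nat × Nat × List String),
    (mem.map some ++ [none]).foldl (aStep aw) st
    = (((mem.map (fun w => if w > 0 then w else 0)).map some) ++ [none]).foldl (aStep aw) st := by
  induction mem with
  | nil => intro st; rfl
  | cons x xs ih =>
    intro st
    have h : (if x < 0 then (0 : Int) else x)
        = (if (if x > 0 then x else 0) < 0 then (0 : Int) else if x > 0 then x else 0) := by
      split_ifs <;> omega
    have hstep : aStep aw st (some x) = aStep aw st (some (if x > 0 then x else 0)) := by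
      simp only [aStep, Option.map_some, h]
    simp only [List.map_cons, List.cons_append, List.foldl_cons]
    rw [ih, hstep]

-- the middle (content-line) segment: A's state machine = B's boundary pairing
theorem core (aw : Nat) (vals : List Int) (hnn : ∀ x ∈ vals, 0 ≤ x) :
    ((vals.map some ++ [none]).foldl (aStep aw) (some (-1), 0, 0, [])).2.2.2
    = ((if vals.isEmpty then ([] : List Nat)
        else 0 :: ((vals.zip (vals.drop 1)).zipIdx.filterMap
          (fun q => if q.1.1 ≠ q.1.2 then some (q.2 + 1) else none))).zip
        ((if vals.isEmpty then ([] : List Nat)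
        else 0 :: ((vals.zip (vals.drop 1)).zipIdx.filterMap
          (fun q => if q.1.1 ≠ q.1.2 then some (q.2 + 1) else none))).drop 1 ++ [vals.length])).map
        (fun se =>
          (if se.2 - se.1 == 1 then "\t" ++ hexPad aw se.1
           else "\t[" ++ hexPad aw se.1 ++ ".." ++ hexPad aw (se.2 - 1) ++ "]")
          ++ " : " ++ hexPad 3 (vals.getD se.1 0).toNat ++ ";") := by
  cases vals with
  | nil =>
    rfl
  | cons c rest =>
    have hc : 0 ≤ c := hnn c (by simp)
    simp only [List.map_cons, List.cons_append, List.foldl_cons,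
      aStep_some aw (-1) 0 0 [] c hc, if_neg (by omega : ¬ c = -1),
      if_neg (by omega : ¬ (0 : Nat) - 0 ≥ 1)]
    rw [aFold_emit _ rest c 0 1 [] (fun y hy => hnn y (by simp [hy])) hc (by omega)]
    rw [show (c :: rest).isEmpty = false by rfl]
    simp only [Bool.false_eq_true, if_false, List.drop_succ_cons, List.drop_zero]
    rw [zipIdx_bnds rest c 0]
    simp only [Nat.zero_add, List.nil_append]
    exact (bPairs_emit (c :: rest) aw rest c 0 1 (by simp) (by simp) (by omega)
      (by simp)).symm

-- ===== VERDICT (by name: the statement is the Claim_ definition above) =====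
theorem mif_lines_spec : Claim_equal_mif_lines := by
  intro mem _
  unfold Spec_mif_lines mif_lines mif_lines_alt
  simp only []
  congr 1
  congr 1
  rw [fold_clamp]
  rw [core ((bitLength mem.length + 3) / 4) (mem.map (fun w => if w > 0 then w else 0))
      (by intro x hx; simp at hx; obtain ⟨y, _, rfl⟩ := hx; split <;> omega)]
  simp
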